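-- pv_equiv track=rewrite | github.com/AhmedSherifAST/anago | genAravec.py | getAllPredTags
-- ===== SOURCE A (Python) =====
-- def getAllPredTags(x_test_org,y_pred):
--
--     tupleArray=[]
--     PERS=[]
--     LOC=[]
--     ORG=[]
--     MISC=[]
--
--     for eachIndex in range(len(y_pred)):
--         for index in range(len(y_pred[eachIndex])):
--             if(y_pred[eachIndex][index]!="O" ):
--                 tag=y_pred[eachIndex][index]
--                 word=x_test_org[eachIndex][index]
--                 tag=tag[2:]
--                 if(tag.lower()=="pers"):
--                     PERS.append(word)
--
--                 if(tag.lower() == "org"):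
--                     ORG.append(word)
--
--                 if(tag.lower() == "loc"):
--                     LOC.append(word)
--
--                 if(tag.lower() == "misc"):
--                     MISC.append(word)
--
--     persArray=(PERS,"PERS")
--     orgArray=(ORG,"ORG")
--     locArray=(LOC,"LOC")
--     miscArray=(MISC,"MISC")
--     tupleArray.append(persArray)
--     tupleArray.append(orgArray)
--     tupleArray.append(locArray)
--     tupleArray.append(miscArray)
--
--     return tupleArray
-- ===== SOURCE B (Python) =====
-- def getAllPredTags(x_test_org, y_pred):
--     def pick(label):
--         return [x_test_org[i][j]
--                 for i in range(len(y_pred))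
--                 for j in range(len(y_pred[i]))
--                 if y_pred[i][j] != "O" and y_pred[i][j][2:].lower() == label]
--     return [(pick("pers"), "PERS"), (pick("org"), "ORG"),
--             (pick("loc"), "LOC"), (pick("misc"), "MISC")]
-- ===== Notes on version B (the rewrite author's own statement) =====
-- stated objective: simpler
-- what changed: Replaces the single stateful pass that threads four accumulator lists through nested index loops with four independent declarative filtering passes (one comprehension per entity type) assembled directly into the result.
import Mathlib
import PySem

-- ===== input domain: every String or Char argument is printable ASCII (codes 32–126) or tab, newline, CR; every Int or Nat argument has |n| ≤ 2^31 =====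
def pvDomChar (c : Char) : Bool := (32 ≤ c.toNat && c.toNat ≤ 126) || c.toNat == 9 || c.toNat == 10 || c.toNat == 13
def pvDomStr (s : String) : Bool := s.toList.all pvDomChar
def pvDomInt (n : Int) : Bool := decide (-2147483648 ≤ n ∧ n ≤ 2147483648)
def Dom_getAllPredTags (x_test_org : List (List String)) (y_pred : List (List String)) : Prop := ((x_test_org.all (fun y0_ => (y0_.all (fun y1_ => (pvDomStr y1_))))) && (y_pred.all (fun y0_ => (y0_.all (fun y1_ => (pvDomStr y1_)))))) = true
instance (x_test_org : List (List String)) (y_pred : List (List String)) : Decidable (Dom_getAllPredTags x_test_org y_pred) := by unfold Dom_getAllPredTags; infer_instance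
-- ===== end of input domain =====

-- B replaces A's single stateful pass (four accumulators threaded through nested index loops)
-- with four independent declarative filtering passes, one per entity type: simpler, same cost.


-- ===== PORT A =====
-- state = (PERS, ORG, LOC, MISC); append y[2:]-mimicking slice/lower via PySem.Str
def getAllPredTags (x_test_org : List (List String)) (y_pred : List (List String)) : List (List String × String) :=
  let st :=
    (PySem.List.pyRange 0 (y_pred.length : Int)).foldl
      (fun (st : List String × List String × List String × List String) eachIndex =>
        let row := PySem.List.pyGetD y_pred eachIndex []
        (PySem.List.pyRange 0 (row.length : Int)).foldl
          (fun st index =>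
            let tag0 := PySem.List.pyGetD row index ""
            if tag0 ≠ "O" then
              let word := PySem.List.pyGetD (PySem.List.pyGetD x_test_org eachIndex []) index ""
              let tag := PySem.Str.slice tag0 (some 2) none
              let st := if PySem.Str.lower tag = "pers" then (st.1 ++ [word], st.2.1, st.2.2.1, st.2.2.2) else st
              let st := if PySem.Str.lower tag = "org" then (st.1, st.2.1 ++ [word], st.2.2.1, st.2.2.2) else st
              let st := if PySem.Str.lower tag = "loc" then (st.1, st.2.1, st.2.2.1 ++ [word], st.2.2.2) else st
              let st := if PySem.Str.lower tag = "misc" then (st.1, st.2.1, st.2.2.1, st.2.2.2 ++ [word]) else st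
              st
            else st)
          st)
      ([], [], [], [])
  [(st.1, "PERS"), (st.2.1, "ORG"), (st.2.2.1, "LOC"), (st.2.2.2, "MISC")]

-- ===== PORT B =====
-- pick label = [x[i][j] for i in range(len(y)) for j in range(len(y[i])) if y[i][j] != "O" and y[i][j][2:].lower() == label]
def pvPick (x_test_org : List (List String)) (y_pred : List (List String)) (label : String) : List String :=
  (List.range y_pred.length).flatMap (fun i =>
    (List.range ((y_pred.getD i []).length)).filterMap (fun j =>
      if (y_pred.getD i []).getD j "" ≠ "O" ∧
          PySem.Str.lower (PySem.Str.slice ((y_pred.getD i []).getD j "") (some 2) none) = label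
      then some ((x_test_org.getD i []).getD j "") else none))

def getAllPredTags_alt (x_test_org : List (List String)) (y_pred : List (List String)) : List (List String × String) :=
  [(pvPick x_test_org y_pred "pers", "PERS"), (pvPick x_test_org y_pred "org", "ORG"),
   (pvPick x_test_org y_pred "loc", "LOC"), (pvPick x_test_org y_pred "misc", "MISC")]

-- ===== PRECONDITION & SPEC =====
-- Pre_ excludes exactly the inputs on which Python A raises IndexError: some cell of y_pred
-- holding a tag other than "O" has no corresponding cell in x_test_org.
def Pre_getAllPredTags (x_test_org : List (List String)) (y_pred : List (List String)) : Prop :=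
  ∀ i < y_pred.length, ∀ j < (y_pred.getD i []).length,
    (y_pred.getD i []).getD j "" ≠ "O" → i < x_test_org.length ∧ j < (x_test_org.getD i []).length
instance (x_test_org : List (List String)) (y_pred : List (List String)) : Decidable (Pre_getAllPredTags x_test_org y_pred) := by unfold Pre_getAllPredTags; infer_instance
def pvWitness_getAllPredTags : List (List String) × List (List String) :=
  ([["Ahmed", "visited", "Cairo"]], [["B-PERS", "O", "B-LOC"]])

def Spec_getAllPredTags (x_test_org : List (List String)) (y_pred : List (List String)) (out : List (List String × String)) : Prop := out = getAllPredTags_alt x_test_org y_pred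
instance (x_test_org : List (List String)) (y_pred : List (List String)) (out : List (List String × String)) : Decidable (Spec_getAllPredTags x_test_org y_pred out) := by unfold Spec_getAllPredTags; infer_instance

-- ===== CLAIM (what is proved, stated in full; the proofs are below) =====
def Claim_equal_getAllPredTags : Prop := ∀ (x_test_org : List (List String)) (y_pred : List (List String)), Dom_getAllPredTags x_test_org y_pred → Pre_getAllPredTags x_test_org y_pred → Spec_getAllPredTags x_test_org y_pred (getAllPredTags x_test_org y_pred)

-- ===== LEMMAS AND PROOFS =====

-- a fold whose step appends to each of four components independently is four flatMaps
theorem pv_foldl_step4 {α : Type} (L : List α)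
    (g1 g2 g3 g4 : α → List String)
    (f : (List String × List String × List String × List String) → α → (List String × List String × List String × List String))
    (hf : ∀ st e, f st e = (st.1 ++ g1 e, st.2.1 ++ g2 e, st.2.2.1 ++ g3 e, st.2.2.2 ++ g4 e))
    (init : List String × List String × List String × List String) :
    L.foldl f init = (init.1 ++ L.flatMap g1, init.2.1 ++ L.flatMap g2,
                      init.2.2.1 ++ L.flatMap g3, init.2.2.2 ++ L.flatMap g4) := by
  induction L generalizing init with
  | nil => simp
  | cons a L ih => simp [List.foldl_cons, hf, ih]

theorem pv_filterMap_ite {α : Type} (L : List α) (c : α → Prop) [DecidablePred c] (w : α → String) :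
    L.filterMap (fun e => if c e then some (w e) else none)
      = L.flatMap (fun e => if c e then [w e] else []) := by
  induction L with
  | nil => rfl
  | cons a L ih =>
    by_cases h : c a <;> simp [h, ih]

set_option maxHeartbeats 1000000 in
theorem getAllPredTags_spec : Claim_equal_getAllPredTags := by
  intro x y _ _
  unfold Spec_getAllPredTags getAllPredTags getAllPredTags_alt pvPick
  simp only [PySem.List.pyRange_zero_natCast, List.foldl_map, PySem.List.pyGetD_natCast]
  rw [pv_foldl_step4 (List.range y.length)
      (fun i => (List.range ((y.getD i []).length)).flatMap (fun j =>
        if (y.getD i []).getD j "" ≠ "O" ∧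
            PySem.Str.lower (PySem.Str.slice ((y.getD i []).getD j "") (some 2) none) = "pers"
        then [(x.getD i []).getD j ""] else []))
      (fun i => (List.range ((y.getD i []).length)).flatMap (fun j =>
        if (y.getD i []).getD j "" ≠ "O" ∧
            PySem.Str.lower (PySem.Str.slice ((y.getD i []).getD j "") (some 2) none) = "org"
        then [(x.getD i []).getD j ""] else []))
      (fun i => (List.range ((y.getD i []).length)).flatMap (fun j =>
        if (y.getD i []).getD j "" ≠ "O" ∧
            PySem.Str.lower (PySem.Str.slice ((y.getD i []).getD j "") (some 2) none) = "loc"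
        then [(x.getD i []).getD j ""] else []))
      (fun i => (List.range ((y.getD i []).length)).flatMap (fun j =>
        if (y.getD i []).getD j "" ≠ "O" ∧
            PySem.Str.lower (PySem.Str.slice ((y.getD i []).getD j "") (some 2) none) = "misc"
        then [(x.getD i []).getD j ""] else []))]
  · simp [pv_filterMap_ite]
  · intro st i
    rw [pv_foldl_step4 (List.range ((y.getD i []).length))
        (fun j => if (y.getD i []).getD j "" ≠ "O" ∧
            PySem.Str.lower (PySem.Str.slice ((y.getD i []).getD j "") (some 2) none) = "pers"
          then [(x.getD i []).getD j ""] else [])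
        (fun j => if (y.getD i []).getD j "" ≠ "O" ∧
            PySem.Str.lower (PySem.Str.slice ((y.getD i []).getD j "") (some 2) none) = "org"
          then [(x.getD i []).getD j ""] else [])
        (fun j => if (y.getD i []).getD j "" ≠ "O" ∧
            PySem.Str.lower (PySem.Str.slice ((y.getD i []).getD j "") (some 2) none) = "loc"
          then [(x.getD i []).getD j ""] else [])
        (fun j => if (y.getD i []).getD j "" ≠ "O" ∧
            PySem.Str.lower (PySem.Str.slice ((y.getD i []).getD j "") (some 2) none) = "misc"
          then [(x.getD i []).getD j ""] else [])]
    intro st j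
    by_cases h0 : (y[i]?.getD [])[j]?.getD "" = "O"
    · simp [h0]
    · by_cases h1 : PySem.Str.lower (PySem.Str.slice ((y[i]?.getD [])[j]?.getD "") (some 2) none) = "pers" <;>
      by_cases h2 : PySem.Str.lower (PySem.Str.slice ((y[i]?.getD [])[j]?.getD "") (some 2) none) = "org" <;>
      by_cases h3 : PySem.Str.lower (PySem.Str.slice ((y[i]?.getD [])[j]?.getD "") (some 2) none) = "loc" <;>
      by_cases h4 : PySem.Str.lower (PySem.Str.slice ((y[i]?.getD [])[j]?.getD "") (some 2) none) = "misc" <;>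
      simp [h0, h1, h2, h3, h4]
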